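-- pv_equiv track=rewrite | github.com/spongebob03/online-algorithm-study | yeoun/week7/보석 쇼핑(시간초과).py | solution
-- ===== SOURCE A (Python) =====
-- from itertools import combinations
--
-- def solution(gems):
--     # 진열대 길이
--     N = len(gems)
--     # 보석의 종류들
--     gem_types = set(gems)
--
--     # 보석이 한 종류면 첫번째 것만 고르면 됨
--     if len(gem_types) == 1:
--         return [1,1]
--
--     # 선택의 시작과 끝을 combination으로 구함
--     combs = list(combinations(list(range(N)), 2))
--
--     # 진열대 총 길이로 span 초기화
--     span = N
--
--     # 선택의 시작 번호가 큰 것에서 작은 것으로 순서대로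
--     for comb in combs[::-1]:
--         # 현재 고른 시작과 끝에 모든 보석의 종류가 포함되어 있으면
--         if set(gems[comb[0]:comb[1]+1]) == gem_types:
--             cur_span = comb[1] - comb[0] + 1
--             # 현재 span이 지금까지의 span보다 작으면 (더 짧은 구간이면)
--             if cur_span <= span:
--                 span = cur_span
--                 # 진열대 번호는 0이 아니라, 1부터 시작하므로
--                 answer = [comb[0]+1, comb[1]+1]
--
--     return answer
-- ===== SOURCE B (Python) =====
-- def first_valid_end(gems, types, i):
--     """Smallest j >= i such that gems[i..j] contains every gem type, or None."""
--     seen = set()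
--     for j in range(i, len(gems)):
--         seen.add(gems[j])
--         if seen == types:
--             return j
--     return None
--
--
-- def solution(gems):
--     types = set(gems)
--     best = None  # (span, start, end) of the best window so far
--     for i in range(len(gems)):
--         j = first_valid_end(gems, types, i)
--         if j is not None and (best is None or j - i + 1 < best[0]):
--             best = (j - i + 1, i, j)
--     return [best[1] + 1, best[2] + 1]
-- ===== Notes on version B (the rewrite author's own statement) =====
-- stated objective: faster
-- what changed: A materialises all index pairs with itertools.combinations, reverses them, and re-slices the list and rebuilds a set for every pair; B scans each start once, growing the window's type set incrementally and stopping at the first end that covers all types.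
-- outside the precondition, e.g. on solution([]): A raises UnboundLocalError, B raises TypeError
import Mathlib
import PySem

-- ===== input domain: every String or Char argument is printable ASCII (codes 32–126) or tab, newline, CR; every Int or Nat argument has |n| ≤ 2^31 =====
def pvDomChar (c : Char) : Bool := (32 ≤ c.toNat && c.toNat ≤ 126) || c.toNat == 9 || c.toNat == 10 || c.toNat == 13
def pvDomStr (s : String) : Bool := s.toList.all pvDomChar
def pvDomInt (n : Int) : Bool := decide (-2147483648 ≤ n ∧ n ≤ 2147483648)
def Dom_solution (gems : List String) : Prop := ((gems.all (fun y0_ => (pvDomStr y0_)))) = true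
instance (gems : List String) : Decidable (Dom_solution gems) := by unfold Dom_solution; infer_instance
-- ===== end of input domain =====

-- B replaces A's O(N^3) scan of all index pairs (slice + set per pair, over the reversed
-- combination list) by an O(N^2) per-start scan that grows the window's type set
-- incrementally and stops at the first covering end; objective: faster.

-- ===== PORT A =====
def solution (gems : List String) : List Int :=
  let N : Int := gems.length
  let gemTypes : PySem.Set String := PySem.Set.ofList gems
  if PySem.Set.len gemTypes == 1 then [1, 1]
  else
    let combs : List (List Int) := PySem.List.combinations (PySem.List.pyRange 0 N) 2
    -- combs[::-1]
    let rev : List (List Int) := (PySem.List.slice? combs none none (-1)).getD []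
    let st : Int × Option (List Int) := rev.foldl (fun st comb =>
      let c0 := PySem.List.pyGetD comb 0 0
      let c1 := PySem.List.pyGetD comb 1 0
      if PySem.Set.equal (PySem.Set.ofList (PySem.List.slice gems (some c0) (some (c1 + 1)))) gemTypes then
        if c1 - c0 + 1 ≤ st.1 then (c1 - c0 + 1, some [c0 + 1, c1 + 1]) else st
      else st) (N, none)
    -- none = Python UnboundLocalError ('answer' never assigned); excluded by Pre_solution
    st.2.getD []

-- ===== PORT B =====
-- inner 'for j in range(i, len(gems))' loop of first_valid_end, with early return
def fveGo (gems : List String) (types : PySem.Set String) (seen : PySem.Set String) :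
    List Int → Option Int
  | [] => none
  | j :: rest =>
    let seen' := PySem.Set.add seen (PySem.List.pyGetD gems j "")
    if PySem.Set.equal seen' types then some j else fveGo gems types seen' rest

def firstValidEnd (gems : List String) (types : PySem.Set String) (i : Int) : Option Int :=
  fveGo gems types PySem.Set.empty (PySem.List.pyRange i (gems.length : Int))

def solution_alt (gems : List String) : List Int :=
  let types := PySem.Set.ofList gems
  let best : Option (Int × Int × Int) :=
    (PySem.List.pyRange 0 (gems.length : Int)).foldl (fun best i =>
      match firstValidEnd gems types i with
      | none => best
      | some j =>
        match best with
        | none => some (j - i + 1, i, j)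
        | some b => if j - i + 1 < b.1 then some (j - i + 1, i, j) else best) none
  match best with
  | some b => [b.2.1 + 1, b.2.2 + 1]
  -- best is None = Python TypeError; excluded by Pre_solution
  | none => []

-- ===== PRECONDITION & SPEC =====
-- On the empty list A raises UnboundLocalError ('answer' is never assigned) and B raises
-- TypeError, so it is excluded; A returns normally on every non-empty list.
def Pre_solution (gems : List String) : Prop := gems ≠ []
instance (gems : List String) : Decidable (Pre_solution gems) := by unfold Pre_solution; infer_instance
def pvWitness_solution : List String := ["a", "b", "a"]

def Spec_solution (gems : List String) (out : List Int) : Prop := out = solution_alt gems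
instance (gems : List String) (out : List Int) : Decidable (Spec_solution gems out) := by unfold Spec_solution; infer_instance

-- ===== CLAIM (what is proved, stated in full; the proofs are below) =====
def Claim_equal_solution : Prop := ∀ (gems : List String), Dom_solution gems → Pre_solution gems → Spec_solution gems (solution gems)

-- ===== LEMMAS AND PROOFS =====

-- window validity: every gem type occurs at an index in [i, j]
def pvV (gems : List String) (i j : Nat) : Prop :=
  ∀ g ∈ gems, ∃ k, i ≤ k ∧ k ≤ j ∧ ∃ h : k < gems.length, gems[k] = g

-- combined minimisation key: span first, then start (injective on windows)
def pvK (N i j : Nat) : Nat := (j - i + 1) * (N + 1) + i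

-- lexicographic order on index pairs
def pvLex (p q : Nat × Nat) : Prop := p.1 < q.1 ∨ (p.1 = q.1 ∧ p.2 < q.2)

-- pairs (i, j), i < j, from a list, in combinations order
def pvPairs : List Nat → List (Nat × Nat)
  | [] => []
  | x :: r => r.map (fun y => (x, y)) ++ pvPairs r

-- A's loop body on an abstract index pair
def pvStepA (gems : List String) (st : Int × Option (List Int)) (p : Nat × Nat) :
    Int × Option (List Int) :=
  if PySem.Set.equal (PySem.Set.ofList (PySem.List.slice gems (some (p.1 : Int)) (some ((p.2 : Int) + 1)))) (PySem.Set.ofList gems) then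
    if (p.2 : Int) - (p.1 : Int) + 1 ≤ st.1 then
      ((p.2 : Int) - (p.1 : Int) + 1, some [(p.1 : Int) + 1, (p.2 : Int) + 1])
    else st
  else st

-- B's outer-loop body, named
def pvStepB (gems : List String) (best : Option (Int × Int × Int)) (i : Int) :
    Option (Int × Int × Int) :=
  match firstValidEnd gems (PySem.Set.ofList gems) i with
  | none => best
  | some j =>
    match best with
    | none => some (j - i + 1, i, j)
    | some b => if j - i + 1 < b.1 then some (j - i + 1, i, j) else best

lemma pv_mem_window (gems : List String) (i j : Nat) (hj : j < gems.length) (g : String) :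
    g ∈ (gems.drop i).take (j + 1 - i) ↔
      ∃ k, i ≤ k ∧ k ≤ j ∧ ∃ h : k < gems.length, gems[k] = g := by
  constructor
  · intro hg
    obtain ⟨m, hm, hgm⟩ := List.mem_iff_getElem.mp hg
    have hlen : m < j + 1 - i ∧ i + m < gems.length := by
      have := hm
      simp [List.length_take, List.length_drop] at this
      omega
    have hget : (List.take (j + 1 - i) (List.drop i gems))[m] = gems[i + m] := by
      rw [List.getElem_take, List.getElem_drop]
    refine ⟨i + m, by omega, by omega, by omega, ?_⟩
    rw [← hgm, hget]
  · rintro ⟨k, h1, h2, hk, hgk⟩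
    apply List.mem_iff_getElem.mpr
    have hlen2 : (List.take (j + 1 - i) (List.drop i gems)).length
        = min (j + 1 - i) (gems.length - i) := by
      simp [List.length_take, List.length_drop]
    refine ⟨k - i, by omega, ?_⟩
    rw [List.getElem_take, List.getElem_drop, ← hgk]
    congr 1
    omega

lemma pv_equal_window_iff (gems : List String) (i j : Nat) (hj : j < gems.length) :
    (PySem.Set.equal (PySem.Set.ofList ((gems.drop i).take (j + 1 - i))) (PySem.Set.ofList gems) = true)
      ↔ pvV gems i j := by
  rw [PySem.Set.equal_iff]
  constructor
  · intro h g hg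
    have hmem : g ∈ (gems.drop i).take (j + 1 - i) := by
      have := (h g).mpr ((PySem.Set.mem_ofList gems g).mpr hg)
      exact (PySem.Set.mem_ofList _ g).mp this
    exact (pv_mem_window gems i j hj g).mp hmem
  · intro h x
    rw [PySem.Set.mem_ofList, PySem.Set.mem_ofList]
    constructor
    · intro hx
      obtain ⟨k, _, _, hk, hgk⟩ := (pv_mem_window gems i j hj x).mp hx
      exact hgk ▸ List.getElem_mem hk
    · intro hx
      exact (pv_mem_window gems i j hj x).mpr (h x hx)
lemma pvV_full {gems : List String} (h : gems ≠ []) : pvV gems 0 (gems.length - 1) := by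
  intro g hg
  obtain ⟨k, hk, hgk⟩ := List.mem_iff_getElem.mp hg
  have : gems.length ≠ 0 := by simpa using List.length_pos_of_ne_nil h |>.ne'
  exact ⟨k, by omega, by omega, hk, hgk⟩

lemma pv_two_types {gems : List String} (hne : gems ≠ [])
    (hT : (PySem.Set.ofList gems).length ≠ 1) :
    ∃ g1 ∈ gems, ∃ g2 ∈ gems, g1 ≠ g2 := by
  cases hofl : PySem.Set.ofList gems with
  | nil =>
    exfalso
    obtain ⟨g, hg⟩ := List.exists_mem_of_ne_nil gems hne
    have := (PySem.Set.mem_ofList gems g).mpr hg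
    rw [hofl] at this
    simp at this
  | cons a t =>
    cases t with
    | nil => exact absurd (by rw [hofl]; rfl) hT
    | cons b t2 =>
      have hnd := PySem.Set.nodup_ofList gems
      rw [hofl] at hnd
      have hab : a ≠ b := by
        intro hab
        subst hab
        simp [List.nodup_cons] at hnd
      have ha : a ∈ gems := (PySem.Set.mem_ofList gems a).mp (by rw [hofl]; simp)
      have hb : b ∈ gems := (PySem.Set.mem_ofList gems b).mp (by rw [hofl]; simp)
      exact ⟨a, ha, b, hb, hab⟩

lemma pv_not_V_diag {gems : List String} (hne : gems ≠ [])
    (hT : (PySem.Set.ofList gems).length ≠ 1) (i : Nat) : ¬ pvV gems i i := by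
  intro hV
  obtain ⟨g1, hg1, g2, hg2, hne12⟩ := pv_two_types hne hT
  obtain ⟨k1, hk1a, hk1b, hk1, he1⟩ := hV g1 hg1
  obtain ⟨k2, hk2a, hk2b, hk2, he2⟩ := hV g2 hg2
  have : k1 = i := by omega
  have : k2 = i := by omega
  apply hne12; subst he1 he2; congr 1
  omega

lemma pv_one_type {gems : List String} (hT : (PySem.Set.ofList gems).length = 1) :
    ∀ g ∈ gems, ∀ g' ∈ gems, g = g' := by
  intro g hg g' hg'
  cases hofl : PySem.Set.ofList gems with
  | nil => rw [hofl] at hT; simp at hT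
  | cons a t =>
    cases t with
    | nil =>
      have h1 := (PySem.Set.mem_ofList gems g).mpr hg
      have h2 := (PySem.Set.mem_ofList gems g').mpr hg'
      rw [hofl] at h1 h2
      simp at h1 h2
      rw [h1, h2]
    | cons b t2 => rw [hofl] at hT; simp at hT

lemma pvK_le (N : Nat) {i j i' j' : Nat} (hiN : i ≤ N)
    (h1 : j - i ≤ j' - i') (h2 : j - i = j' - i' → i ≤ i') : pvK N i j ≤ pvK N i' j' := by
  unfold pvK
  rcases Nat.lt_or_ge (j - i) (j' - i') with h | h
  · have ha : j - i + 2 ≤ j' - i' + 1 := by omega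
    have hb : (j - i + 2) * (N + 1) ≤ (j' - i' + 1) * (N + 1) := Nat.mul_le_mul_right _ ha
    have hc : (j - i + 2) * (N + 1) = (j - i + 1) * (N + 1) + (N + 1) := by ring
    omega
  · have heq : j - i = j' - i' := by omega
    rw [heq]
    have := h2 heq
    omega

lemma pvK_inj (N : Nat) {i j i' j' : Nat} (hi : i ≤ N) (hi' : i' ≤ N)
    (hs : j - i = j' - i' → (i = i' → j = j'))
    (h : pvK N i j = pvK N i' j') : i = i' ∧ j = j' := by
  unfold pvK at h
  have hm : ((j - i + 1) * (N + 1) + i) % (N + 1) = ((j' - i' + 1) * (N + 1) + i') % (N + 1) := by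
    rw [h]
  rw [Nat.mul_add_mod', Nat.mul_add_mod', Nat.mod_eq_of_lt (by omega),
    Nat.mod_eq_of_lt (by omega)] at hm
  subst hm
  have hmul : (j - i + 1) * (N + 1) = (j' - i + 1) * (N + 1) := by omega
  have hspan : j - i = j' - i := by
    have := Nat.eq_of_mul_eq_mul_right (Nat.succ_pos N) hmul
    omega
  exact ⟨rfl, hs hspan rfl⟩

lemma pvPairs_comb2 (l : List Nat) :
    PySem.List.combinations l 2 = (pvPairs l).map (fun p => [p.1, p.2]) := by
  induction l with
  | nil => simp [pvPairs, PySem.List.combinations_nil_succ]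
  | cons x r ih =>
    rw [show (2 : Nat) = 1 + 1 from rfl, PySem.List.combinations_cons_succ,
      PySem.List.combinations_one]
    simp [pvPairs, ih, List.map_map, Function.comp_def]

lemma pv_mem_pairs : ∀ (l : List Nat), l.Pairwise (· < ·) → ∀ (p : Nat × Nat),
    (p ∈ pvPairs l ↔ p.1 ∈ l ∧ p.2 ∈ l ∧ p.1 < p.2) := by
  intro l hl p
  induction l with
  | nil => simp [pvPairs]
  | cons x r ih =>
    rw [List.pairwise_cons] at hl
    obtain ⟨hx, hr⟩ := hl
    simp only [pvPairs, List.mem_append, List.mem_map, List.mem_cons, ih hr]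
    constructor
    · rintro (⟨y, hy, rfl⟩ | ⟨h1, h2, h3⟩)
      · exact ⟨Or.inl rfl, Or.inr hy, hx y hy⟩
      · exact ⟨Or.inr h1, Or.inr h2, h3⟩
    · rintro ⟨h1 | h1, h2 | h2, h3⟩
      · omega
      · left; exact ⟨p.2, h2, by rw [← h1]⟩
      · exfalso; have := hx _ h1; omega
      · right; exact ⟨h1, h2, h3⟩

lemma pv_pairs_sorted : ∀ (l : List Nat), l.Pairwise (· < ·) → (pvPairs l).Pairwise pvLex := by
  intro l hl
  induction l with
  | nil => simp [pvPairs]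
  | cons x r ih =>
    rw [List.pairwise_cons] at hl
    obtain ⟨hx, hr⟩ := hl
    rw [pvPairs, List.pairwise_append]
    refine ⟨?_, ih hr, ?_⟩
    · rw [List.pairwise_map]
      exact hr.imp (fun {a b} hab => Or.inr ⟨rfl, hab⟩)
    · rintro p hp q hq
      obtain ⟨y, hy, rfl⟩ := List.mem_map.mp hp
      have hq1 := ((pv_mem_pairs r hr) q).mp hq
      exact Or.inl (hx _ hq1.1)

lemma pv_combs_eq (N : Nat) :
    PySem.List.combinations (PySem.List.pyRange 0 (N : Int)) 2
      = (pvPairs (List.range N)).map (fun p => [(p.1 : Int), (p.2 : Int)]) := by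
  rw [PySem.List.pyRange_one]
  have h1 : (((N : Int)) - 0).toNat = N := by omega
  rw [h1]
  have h2 : (fun k : Nat => (0 : Int) + k) = (fun k : Nat => (k : Int)) := by
    funext k; ring
  rw [h2, PySem.List.combinations_map, pvPairs_comb2, List.map_map]
  rfl

lemma pv_A_loop (gems : List String) (N : Nat) (hN : N = gems.length) :
    ∀ (l : List (Nat × Nat)), (∀ p ∈ l, p.1 < p.2 ∧ p.2 < N) → l.Pairwise pvLex →
    (l.foldr (fun p st => pvStepA gems st p) ((N : Int), none) = ((N : Int), none)
        ∧ ∀ p ∈ l, ¬ pvV gems p.1 p.2)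
    ∨ (∃ i j, (i, j) ∈ l ∧ pvV gems i j ∧
        l.foldr (fun p st => pvStepA gems st p) ((N : Int), none)
          = (((j - i + 1 : Nat) : Int), some [(i : Int) + 1, (j : Int) + 1]) ∧
        ∀ p ∈ l, pvV gems p.1 p.2 → pvK N i j ≤ pvK N p.1 p.2) := by
  intro l
  induction l with
  | nil =>
    intro _ _
    left
    exact ⟨rfl, by simp⟩
  | cons p r ih =>
    intro hb hs
    rw [List.pairwise_cons] at hs
    obtain ⟨hp, hr⟩ := hs
    obtain ⟨hp12, hp2N⟩ := hb p (List.mem_cons_self)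
    have hIH := ih (fun q hq => hb q (List.mem_cons_of_mem p hq)) hr
    rw [List.foldr_cons]
    have hslice : PySem.List.slice gems (some ((p.1 : Nat) : Int)) (some (((p.2 : Nat) : Int) + 1))
        = (gems.drop p.1).take (p.2 + 1 - p.1) := by
      have hc : ((p.2 : Nat) : Int) + 1 = (((p.2 + 1 : Nat)) : Int) := by omega
      rw [hc, PySem.List.slice_natCast]
    have hcond := pv_equal_window_iff gems p.1 p.2 (by omega)
    rw [pvStepA, hslice]
    by_cases hV : pvV gems p.1 p.2
    · rw [if_pos (hcond.mpr hV)]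
      rcases hIH with ⟨heq, hnoneV⟩ | ⟨i, j, hmem, hVij, heq, hmin⟩
      · rw [heq]
        rw [if_pos (by simp only []; omega)]
        right
        refine ⟨p.1, p.2, by simp, hV, ?_, ?_⟩
        · have : ((p.2 : Nat) : Int) - ((p.1 : Nat) : Int) + 1 = ((p.2 - p.1 + 1 : Nat) : Int) := by
            omega
          rw [this]
        · intro q hq hVq
          rcases List.mem_cons.mp hq with rfl | hqr
          · exact le_refl _
          · exact absurd hVq (hnoneV q hqr)
      · obtain ⟨hij, hjN⟩ := hb (i, j) (List.mem_cons_of_mem p hmem)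
        rw [heq]
        by_cases hle : p.2 - p.1 ≤ j - i
        · rw [if_pos (by simp only []; omega)]
          right
          refine ⟨p.1, p.2, by simp, hV, ?_, ?_⟩
          · have : ((p.2 : Nat) : Int) - ((p.1 : Nat) : Int) + 1 = ((p.2 - p.1 + 1 : Nat) : Int) := by
              omega
            rw [this]
          · intro q hq hVq
            rcases List.mem_cons.mp hq with rfl | hqr
            · exact le_refl _
            · refine le_trans ?_ (hmin q hqr hVq)
              have hlex := hp (i, j) hmem
              rcases hlex with hlex | ⟨hlex1, hlex2⟩
              · exact pvK_le N (i := p.1) (j := p.2) (i' := i) (j' := j)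
                  (by omega) hle (by omega)
              · exact pvK_le N (i := p.1) (j := p.2) (i' := i) (j' := j)
                  (by omega) hle (by omega)
        · rw [if_neg (by simp only []; omega)]
          right
          refine ⟨i, j, List.mem_cons_of_mem p hmem, hVij, rfl, ?_⟩
          intro q hq hVq
          rcases List.mem_cons.mp hq with rfl | hqr
          · exact pvK_le N (i := i) (j := j) (i' := q.1) (j' := q.2)
              (by omega) (by omega) (by omega)
          · exact hmin q hqr hVq
    · rw [if_neg (fun h => hV (hcond.mp h))]
      rcases hIH with ⟨heq, hnoneV⟩ | ⟨i, j, hmem, hVij, heq, hmin⟩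
      · left
        refine ⟨heq, ?_⟩
        intro q hq
        rcases List.mem_cons.mp hq with rfl | hqr
        · exact hV
        · exact hnoneV q hqr
      · right
        refine ⟨i, j, List.mem_cons_of_mem p hmem, hVij, heq, ?_⟩
        intro q hq hVq
        rcases List.mem_cons.mp hq with rfl | hqr
        · exact absurd hVq hV
        · exact hmin q hqr hVq

lemma pv_window_snoc (gems : List String) (i c : Nat) (hic : i ≤ c) (hc : c < gems.length) :
    (gems.drop i).take (c - i) ++ [gems[c]] = (gems.drop i).take (c + 1 - i) := by
  have h1 : c + 1 - i = (c - i) + 1 := by omega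
  rw [h1, List.take_add_one]
  congr 1
  have hkey : i + (c - i) = c := by omega
  rw [List.getElem?_drop, hkey, List.getElem?_eq_getElem hc]
  rfl

lemma pv_fveGo (gems : List String) (N : Nat) (hN : N = gems.length) (i : Nat) :
    ∀ (d c : Nat), N - c = d → i ≤ c → c ≤ N →
    ∀ seen, seen = PySem.Set.ofList ((gems.drop i).take (c - i)) →
    (fveGo gems (PySem.Set.ofList gems) seen (PySem.List.pyRange (c : Int) (N : Int)) = none
        ∧ ∀ j, c ≤ j → j < N → ¬ pvV gems i j)
    ∨ (∃ jv : Nat, c ≤ jv ∧ jv < N ∧ pvV gems i jv ∧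
        (∀ j', c ≤ j' → j' < jv → ¬ pvV gems i j') ∧
        fveGo gems (PySem.Set.ofList gems) seen (PySem.List.pyRange (c : Int) (N : Int))
          = some (jv : Int)) := by
  intro d
  induction d with
  | zero =>
    intro c hd hic hcN seen hseen
    have hceq : c = N := by omega
    subst hceq
    rw [PySem.List.pyRange_one_eq_nil (by omega)]
    left
    refine ⟨rfl, ?_⟩
    intro j h1 h2 _
    omega
  | succ d ih =>
    intro c hd hic hcN seen hseen
    have hcltN : c < N := by omega
    have hclen : c < gems.length := by omega
    rw [PySem.List.pyRange_one_cons (by exact_mod_cast hcltN), fveGo]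
    have hget : PySem.List.pyGetD gems ((c : Nat) : Int) "" = gems[c] := by
      rw [PySem.List.pyGetD_natCast, List.getD_eq_getElem gems "" hclen]
    rw [hget, hseen, ← PySem.Set.ofList_append_singleton,
      pv_window_snoc gems i c hic hclen]
    by_cases hV : pvV gems i c
    · rw [if_pos (by rw [pv_equal_window_iff gems i c hclen]; exact hV)]
      right
      exact ⟨c, le_refl c, hcltN, hV, by omega, rfl⟩
    · rw [if_neg (by rw [pv_equal_window_iff gems i c hclen]; exact hV)]
      have hwin : PySem.Set.ofList ((gems.drop i).take (c + 1 - i))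
          = PySem.Set.ofList ((gems.drop i).take ((c + 1) - i)) := rfl
      have := ih (c + 1) (by omega) (by omega) (by omega)
        (PySem.Set.ofList ((gems.drop i).take (c + 1 - i))) hwin
      have hcast : ((c : Int) + 1) = (((c + 1 : Nat)) : Int) := by omega
      rw [hcast]
      rcases this with ⟨heq, hnone⟩ | ⟨jv, h1, h2, h3, h4, h5⟩
      · left
        refine ⟨heq, ?_⟩
        intro j hj1 hj2 hVj
        rcases Nat.eq_or_lt_of_le hj1 with rfl | hlt
        · exact hV hVj
        · exact hnone j (by omega) hj2 hVj
      · right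
        refine ⟨jv, by omega, h2, h3, ?_, h5⟩
        intro j' hj1 hj2 hVj
        rcases Nat.eq_or_lt_of_le hj1 with rfl | hlt
        · exact hV hVj
        · exact h4 j' (by omega) hj2 hVj

lemma pv_B_loop (gems : List String) (N : Nat) (hN : N = gems.length) :
    ∀ (d c : Nat), N - c = d → c ≤ N →
    ∀ (cur : Option (Int × Int × Int)),
    (∀ b, cur = some b → ∃ i0 j0 : Nat, i0 ≤ j0 ∧ j0 < N ∧ pvV gems i0 j0 ∧ i0 < c ∧
        b = (((j0 - i0 + 1 : Nat) : Int), (i0 : Int), (j0 : Int)) ∧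
        ∀ i' j', i' ≤ j' → j' < N → pvV gems i' j' → c ≤ i' ∨ pvK N i0 j0 ≤ pvK N i' j') →
    (cur = none → ∀ i' j', i' ≤ j' → j' < N → pvV gems i' j' → c ≤ i') →
    ((PySem.List.pyRange (c : Int) (N : Int)).foldl (pvStepB gems) cur = none
        ∧ ∀ i' j', i' ≤ j' → j' < N → ¬ pvV gems i' j')
    ∨ (∃ i0 j0 : Nat, i0 ≤ j0 ∧ j0 < N ∧ pvV gems i0 j0 ∧
        (PySem.List.pyRange (c : Int) (N : Int)).foldl (pvStepB gems) cur
          = some (((j0 - i0 + 1 : Nat) : Int), (i0 : Int), (j0 : Int)) ∧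
        ∀ i' j', i' ≤ j' → j' < N → pvV gems i' j' → pvK N i0 j0 ≤ pvK N i' j') := by
  intro d
  induction d with
  | zero =>
    intro c hd hcN cur H1 H0
    have hceq : c = N := by omega
    subst hceq
    rw [PySem.List.pyRange_one_eq_nil (by omega), List.foldl_nil]
    cases cur with
    | none =>
      left
      refine ⟨rfl, ?_⟩
      intro i' j' h1 h2 hV
      have := H0 rfl i' j' h1 h2 hV
      omega
    | some b =>
      obtain ⟨i0, j0, ha, hb, hc, hd', he, hf⟩ := H1 b rfl
      right
      refine ⟨i0, j0, ha, hb, hc, by rw [he], ?_⟩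
      intro i' j' h1 h2 hV
      rcases hf i' j' h1 h2 hV with h | h
      · omega
      · exact h
  | succ d ih =>
    intro c hd hcN cur H1 H0
    have hcltN : c < N := by omega
    rw [PySem.List.pyRange_one_cons (by exact_mod_cast hcltN), List.foldl_cons]
    have hfveEq : firstValidEnd gems (PySem.Set.ofList gems) (c : Int)
        = fveGo gems (PySem.Set.ofList gems) PySem.Set.empty
            (PySem.List.pyRange (c : Int) (N : Int)) := by
      rw [firstValidEnd, hN]
    have hseen : (PySem.Set.empty : PySem.Set String)
        = PySem.Set.ofList ((gems.drop c).take (c - c)) := by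
      rw [Nat.sub_self, List.take_zero, PySem.Set.ofList_nil]
      rfl
    have hfve := pv_fveGo gems N hN c (N - c) c rfl (le_refl c) (by omega)
      PySem.Set.empty hseen
    rcases hfve with ⟨hnone, hmiss⟩ | ⟨jv, hj1, hj2, hjV, hjmin, hsome⟩
    · -- no valid window starts at c
      have hstep : pvStepB gems cur (c : Int) = cur := by
        simp only [pvStepB, hfveEq, hnone]
      rw [hstep]
      apply ih (c + 1) (by omega) (by omega) cur
      · intro b hbeq
        obtain ⟨i0, j0, ha, hb, hc, hd', he, hf⟩ := H1 b hbeq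
        refine ⟨i0, j0, ha, hb, hc, by omega, he, ?_⟩
        intro i' j' h1 h2 hV
        rcases hf i' j' h1 h2 hV with h | h
        · rcases Nat.eq_or_lt_of_le h with rfl | hlt
          · exact absurd hV (hmiss j' (by omega) h2)
          · left; omega
        · right; exact h
      · intro hcn i' j' h1 h2 hV
        have := H0 hcn i' j' h1 h2 hV
        rcases Nat.eq_or_lt_of_le this with rfl | hlt
        · exact absurd hV (hmiss j' (by omega) h2)
        · omega
    · -- least valid end jv for start c
      have hjvle : ∀ j', c ≤ j' → j' < N → pvV gems c j' → jv ≤ j' := by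
        intro j' h1 h2 hV
        by_contra hlt
        exact hjmin j' h1 (by omega) hV
      cases cur with
      | none =>
        have hstep : pvStepB gems none (c : Int)
            = some ((jv : Int) - (c : Int) + 1, (c : Int), (jv : Int)) := by
          simp only [pvStepB, hfveEq, hsome]
        have hcast : (jv : Int) - (c : Int) + 1 = ((jv - c + 1 : Nat) : Int) := by omega
        rw [hstep, hcast]
        apply ih (c + 1) (by omega) (by omega)
        · intro b hbeq
          refine ⟨c, jv, hj1, hj2, hjV, by omega, (Option.some_inj.mp hbeq).symm, ?_⟩
          intro i' j' h1 h2 hV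
          rcases Nat.lt_or_ge i' (c + 1) with hlt | hge
          · have hic : c ≤ i' := H0 rfl i' j' h1 h2 hV
            have hieq : i' = c := by omega
            subst hieq
            right
            exact pvK_le N (by omega) (by have := hjvle j' h1 h2 hV; omega) (fun _ => le_refl _)
          · left; omega
        · intro hcn
          exact absurd hcn (by simp)
      | some b =>
        obtain ⟨i0, j0, ha, hb, hc, hd', he, hf⟩ := H1 b rfl
        subst he
        have hcast : (jv : Int) - (c : Int) + 1 = ((jv - c + 1 : Nat) : Int) := by omega
        by_cases hlt : jv - c + 1 < j0 - i0 + 1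
        · have hstep : pvStepB gems (some (((j0 - i0 + 1 : Nat) : Int), (i0 : Int), (j0 : Int))) (c : Int)
              = some (((jv - c + 1 : Nat) : Int), (c : Int), (jv : Int)) := by
            simp only [pvStepB, hfveEq, hsome, hcast]
            rw [if_pos (by exact_mod_cast hlt)]
          rw [hstep]
          apply ih (c + 1) (by omega) (by omega)
          · intro b' hbeq
            refine ⟨c, jv, hj1, hj2, hjV, by omega, (Option.some_inj.mp hbeq).symm, ?_⟩
            intro i' j' h1 h2 hV
            rcases Nat.lt_or_ge i' (c + 1) with hlt2 | hge
            · rcases hf i' j' h1 h2 hV with hci | hK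
              · have hieq : i' = c := by omega
                subst hieq
                right
                exact pvK_le N (by omega) (by have := hjvle j' h1 h2 hV; omega) (fun _ => le_refl _)
              · right
                refine le_trans (pvK_le N (i := c) (j := jv) (i' := i0) (j' := j0)
                  (by omega) (by omega) (by omega)) hK
            · left; omega
          · intro hcn
            exact absurd hcn (by simp)
        · have hstep : pvStepB gems (some (((j0 - i0 + 1 : Nat) : Int), (i0 : Int), (j0 : Int))) (c : Int)
              = some (((j0 - i0 + 1 : Nat) : Int), (i0 : Int), (j0 : Int)) := by
            simp only [pvStepB, hfveEq, hsome, hcast]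
            rw [if_neg (by exact_mod_cast hlt)]
          rw [hstep]
          apply ih (c + 1) (by omega) (by omega)
          · intro b' hbeq
            refine ⟨i0, j0, ha, hb, hc, by omega, (Option.some_inj.mp hbeq).symm, ?_⟩
            intro i' j' h1 h2 hV
            rcases Nat.lt_or_ge i' (c + 1) with hlt2 | hge
            · rcases hf i' j' h1 h2 hV with hci | hK
              · right
                have hieq : i' = c := by omega
                have hV' : pvV gems c j' := by rw [← hieq]; exact hV
                have hj'ge := hjvle j' (by omega) h2 hV'
                exact pvK_le N (i := i0) (j := j0) (i' := i') (j' := j')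
                  (by omega) (by omega) (by omega)
              · right; exact hK
            · left; omega
          · intro hcn
            exact absurd hcn (by simp)

-- B characterisation: solution_alt returns the key-minimal valid window
lemma pv_B_char (gems : List String) (hne : gems ≠ []) :
    ∃ i0 j0 : Nat, i0 ≤ j0 ∧ j0 < gems.length ∧ pvV gems i0 j0 ∧
      solution_alt gems = [(i0 : Int) + 1, (j0 : Int) + 1] ∧
      ∀ i' j', i' ≤ j' → j' < gems.length → pvV gems i' j' →
        pvK gems.length i0 j0 ≤ pvK gems.length i' j' := by
  have hNpos : 0 < gems.length := List.length_pos_of_ne_nil hne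
  have hmain := pv_B_loop gems gems.length rfl gems.length 0 (by omega) (by omega) none
    (by intro b h; exact absurd h (by simp))
    (by intro _ i' j' _ _ _; omega)
  have halt : solution_alt gems
      = (match (PySem.List.pyRange ((0 : Nat) : Int) ((gems.length : Nat) : Int)).foldl
            (pvStepB gems) none with
        | some b => [b.2.1 + 1, b.2.2 + 1]
        | none => ([] : List Int)) := by
    rfl
  rcases hmain with ⟨heq, hnone⟩ | ⟨i0, j0, ha, hb, hc, heq, hmin⟩
  · exact absurd (pvV_full hne) (hnone 0 (gems.length - 1) (by omega) (by omega))
  · refine ⟨i0, j0, ha, hb, hc, ?_, hmin⟩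
    rw [halt, heq]


-- ===== VERDICT (by name: the statement is the Claim_ definition above) =====
theorem solution_spec : Claim_equal_solution := by
  unfold Claim_equal_solution Spec_solution Pre_solution
  intro gems _ hne
  have hNpos : 0 < gems.length := List.length_pos_of_ne_nil hne
  obtain ⟨i0, j0, hij, hjN, hV0, hBeq, hBmin⟩ := pv_B_char gems hne
  by_cases hT1 : (PySem.Set.ofList gems).length = 1
  · -- single gem type: A returns [1,1] directly
    have hcond : (PySem.Set.len (PySem.Set.ofList gems) == 1) = true := by
      rw [show PySem.Set.len (PySem.Set.ofList gems)
          = (((PySem.Set.ofList gems).length : Nat) : Int) from rfl, hT1]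
      rfl
    have hA : solution gems = [1, 1] := by
      simp only [solution]
      rw [if_pos hcond]
    have hV00 : pvV gems 0 0 := by
      intro g hg
      refine ⟨0, le_refl 0, le_refl 0, hNpos, ?_⟩
      exact pv_one_type hT1 gems[0] (List.getElem_mem hNpos) g hg
    have h1 := hBmin 0 0 (le_refl 0) hNpos hV00
    have h2 : pvK gems.length 0 0 ≤ pvK gems.length i0 j0 :=
      pvK_le gems.length (i := 0) (j := 0) (i' := i0) (j' := j0)
        (by omega) (by omega) (by omega)
    obtain ⟨hi0, hj0⟩ := pvK_inj gems.length (i := i0) (j := j0) (i' := 0) (j' := 0)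
      (by omega) (by omega) (by omega) (le_antisymm h1 h2)
    rw [hA, hBeq, hi0, hj0]
    rfl
  · -- at least two gem types
    have hcne : ¬((PySem.Set.len (PySem.Set.ofList gems) == 1) = true) := by
      rw [show PySem.Set.len (PySem.Set.ofList gems)
          = (((PySem.Set.ofList gems).length : Nat) : Int) from rfl]
      intro h
      exact hT1 (by exact_mod_cast of_decide_eq_true h)
    have hN2 : 2 ≤ gems.length := by
      by_contra hlt
      have hlen1 : gems.length = 1 := by omega
      obtain ⟨x, hx⟩ := List.length_eq_one_iff.mp hlen1
      apply hT1
      rw [hx]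
      rfl
    have hA : solution gems
        = ((pvPairs (List.range gems.length)).foldr (fun p st => pvStepA gems st p)
            ((gems.length : Int), none)).2.getD [] := by
      simp only [solution]
      rw [if_neg hcne, PySem.List.slice?_none_none_neg_one]
      simp only [Option.getD_some]
      rw [List.foldl_reverse, pv_combs_eq gems.length, List.foldr_map]
      rfl
    have hbounds : ∀ p ∈ pvPairs (List.range gems.length), p.1 < p.2 ∧ p.2 < gems.length := by
      intro p hp
      obtain ⟨h1, h2, h3⟩ := (pv_mem_pairs (List.range gems.length) List.pairwise_lt_range p).mp hp
      exact ⟨h3, List.mem_range.mp h2⟩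
    have hmain := pv_A_loop gems gems.length rfl (pvPairs (List.range gems.length))
      hbounds (pv_pairs_sorted (List.range gems.length) List.pairwise_lt_range)
    rcases hmain with ⟨heq, hnoneV⟩ | ⟨iA, jA, hmemA, hVA, heqA, hminA⟩
    · exfalso
      have hmem : ((0 : Nat), gems.length - 1) ∈ pvPairs (List.range gems.length) :=
        (pv_mem_pairs (List.range gems.length) List.pairwise_lt_range _).mpr
          ⟨List.mem_range.mpr (by omega), List.mem_range.mpr (by omega), by omega⟩
      exact hnoneV _ hmem (pvV_full hne)
    · obtain ⟨hijA, hjAN⟩ := hbounds (iA, jA) hmemA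
      have hAval : solution gems = [(iA : Int) + 1, (jA : Int) + 1] := by
        rw [hA, heqA]
        rfl
      have hBtoA := hBmin iA jA (le_of_lt hijA) hjAN hVA
      have hne00 : i0 ≠ j0 := by
        intro hcontra
        exact pv_not_V_diag hne hT1 i0 (hcontra ▸ hV0)
      have hmem0 : (i0, j0) ∈ pvPairs (List.range gems.length) :=
        (pv_mem_pairs (List.range gems.length) List.pairwise_lt_range _).mpr
          ⟨List.mem_range.mpr (by omega), List.mem_range.mpr (by omega), by omega⟩
      have hAtoB := hminA (i0, j0) hmem0 hV0
      obtain ⟨hi, hj⟩ := pvK_inj gems.length (i := iA) (j := jA) (i' := i0) (j' := j0)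
        (by omega) (by omega) (by omega) (le_antisymm hAtoB hBtoA)
      rw [hAval, hBeq, hi, hj]
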